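-- pv_equiv track=rewrite | github.com/hssling/computational-metagenomics | Book_Project/build_book_package.py | strip_tables_and_images
-- ===== SOURCE A (Python) =====
-- def strip_tables_and_images(text: str) -> str:
--     lines = text.splitlines()
--     cleaned: list[str] = []
--     in_table = False
--     for line in lines:
--         if line.startswith("!["):
--             continue
--         if line.startswith("Table:"):
--             in_table = True
--             continue
--         if in_table:
--             if line.startswith("|") or line.strip() == "":
--                 if line.strip() == "":
--                     in_table = False
--                 continue
--             in_table = False
--         cleaned.append(line)
--     return "\n".join(cleaned)
-- ===== SOURCE B (Python) =====
-- def strip_tables_and_images(text: str) -> str: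
--     lines = text.splitlines()
--     out: list[str] = []
--     i = 0
--     n = len(lines)
--     while i < n:
--         line = lines[i]
--         i += 1
--         if line.startswith("!["):
--             continue
--         if line.startswith("Table:"):
--             # consume the whole table block in one inner loop
--             while i < n:
--                 cur = lines[i]
--                 if cur.startswith("![") or cur.startswith("Table:") or cur.startswith("|"):
--                     i += 1
--                     continue
--                 if cur.strip() == "":
--                     i += 1
--                     break
--                 break  # normal line ends the table; outer loop keeps it
--             continue
--         out.append(line)
--     return "\n".join(out)
-- ===== Notes on version B (the rewrite author's own statement) =====
-- stated objective: alternative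
-- what changed: Replaces A's per-line boolean in_table flag with an index-driven outer loop that, on a table-caption line, consumes the whole table block in a dedicated inner loop (breaking without consuming a terminating normal line).
import Mathlib
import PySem

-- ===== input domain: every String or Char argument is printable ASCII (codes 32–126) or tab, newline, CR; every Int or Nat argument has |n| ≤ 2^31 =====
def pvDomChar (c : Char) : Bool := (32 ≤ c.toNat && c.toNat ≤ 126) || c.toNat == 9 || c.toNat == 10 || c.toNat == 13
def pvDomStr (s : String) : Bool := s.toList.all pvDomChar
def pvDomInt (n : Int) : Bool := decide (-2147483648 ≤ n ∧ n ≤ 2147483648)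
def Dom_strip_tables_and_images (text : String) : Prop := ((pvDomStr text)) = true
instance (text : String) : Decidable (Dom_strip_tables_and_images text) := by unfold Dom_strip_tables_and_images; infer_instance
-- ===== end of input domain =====

-- B replaces A's per-line boolean in_table flag with an index-driven loop that
-- consumes each table block in an inner loop (objective: alternative decomposition, same cost).

-- ===== PORT A =====
-- A's for-loop body as a fold step over the state (cleaned, in_table)
def pvStepA (st : List String × Bool) (line : String) : List String × Bool :=
  if PySem.Str.startswith line "![" then st
  else if PySem.Str.startswith line "Table:" then (st.1, true)
  else if st.2 then
    (if PySem.Str.startswith line "|" || PySem.Str.strip line == "" then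
      (st.1, if PySem.Str.strip line == "" then false else st.2)
    else (st.1 ++ [line], false))
  else (st.1 ++ [line], st.2)

def strip_tables_and_images (text : String) : String :=
  PySem.Str.join "\n" (((PySem.Str.splitlines text).foldl pvStepA ([], false)).1)

-- ===== PORT B =====
-- Source B's inner while-loop: consume a table block, returning the remaining lines
def pvSkipTable : List String → List String
  | [] => []
  | cur :: rest =>
    if PySem.Str.startswith cur "![" || PySem.Str.startswith cur "Table:" ||
       PySem.Str.startswith cur "|" then pvSkipTable rest
    else if PySem.Str.strip cur == "" then rest          -- consume the blank and break
    else cur :: rest                                     -- break without consuming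

theorem pvSkipTable_length_le (l : List String) : (pvSkipTable l).length ≤ l.length := by
  induction l with
  | nil => simp [pvSkipTable]
  | cons cur rest ih =>
    simp only [pvSkipTable]
    split_ifs <;> (simp; try omega)

-- Source B's outer while-loop over the remaining lines
def pvGoB : List String → List String
  | [] => []
  | line :: rest =>
    if PySem.Str.startswith line "![" then pvGoB rest
    else if PySem.Str.startswith line "Table:" then pvGoB (pvSkipTable rest)
    else line :: pvGoB rest
termination_by l => l.length
decreasing_by
  all_goals (have := pvSkipTable_length_le rest; simp; try omega)

def strip_tables_and_images_alt (text : String) : String :=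
  PySem.Str.join "\n" (pvGoB (PySem.Str.splitlines text))

-- ===== PRECONDITION & SPEC =====
def Spec_strip_tables_and_images (text : String) (out : String) : Prop := out = strip_tables_and_images_alt text
instance (text : String) (out : String) : Decidable (Spec_strip_tables_and_images text out) := by unfold Spec_strip_tables_and_images; infer_instance

-- ===== CLAIM (what is proved, stated in full; the proofs are below) =====
def Claim_equal_strip_tables_and_images : Prop := ∀ (text : String), Dom_strip_tables_and_images text → Spec_strip_tables_and_images text (strip_tables_and_images text)

-- ===== LEMMAS AND PROOFS =====

-- the lines A's fold appends after state flag b, as a plain recursion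
def pvRecA : List String → Bool → List String
  | [], _ => []
  | line :: rest, b =>
    if PySem.Str.startswith line "![" then pvRecA rest b
    else if PySem.Str.startswith line "Table:" then pvRecA rest true
    else if b then
      (if PySem.Str.startswith line "|" || PySem.Str.strip line == "" then
        (if PySem.Str.strip line == "" then pvRecA rest false else pvRecA rest true)
      else line :: pvRecA rest false)
    else line :: pvRecA rest b

theorem pvFoldA_eq (lines : List String) : ∀ (acc : List String) (b : Bool),
    (lines.foldl pvStepA (acc, b)).1 = acc ++ pvRecA lines b := by
  induction lines with
  | nil => intro acc b; simp [pvRecA]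
  | cons line rest ih =>
    intro acc b
    simp only [List.foldl_cons, pvStepA, pvRecA]
    split_ifs <;> (try subst b) <;> simp [ih]

-- a line starting with '|' is not whitespace-only (A's blank test cannot fire on it)
theorem pvPipe_not_blank (line : String) (h : PySem.Chars.startswith line.toList ['|'] = true) :
    ¬ (PySem.Str.strip line = "") := by
  intro hs
  obtain ⟨t, ht⟩ := (PySem.Chars.startswith_iff _ _).1 h
  have h2 : (PySem.Str.strip line).toList = [] := by rw [hs]; rfl
  rw [PySem.Str.toList_strip] at h2
  rw [← ht] at h2
  simp only [PySem.Chars.strip, PySem.Chars.lstrip, PySem.Chars.rstrip, List.cons_append,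
    List.nil_append, List.dropWhile_cons] at h2
  have hsp : PySem.Chars.isspace '|' = false := by decide
  rw [hsp] at h2
  simp only [Bool.false_eq_true, if_false, List.reverse_eq_nil_iff, List.dropWhile_eq_nil_iff] at h2
  have := h2 '|' (by simp)
  rw [hsp] at this
  exact Bool.false_ne_true this

theorem pvRecA_eq (lines : List String) : ∀ b : Bool,
    pvRecA lines b = if b then pvGoB (pvSkipTable lines) else pvGoB lines := by
  induction lines with
  | nil => intro b; cases b <;> simp [pvRecA, pvGoB, pvSkipTable]
  | cons line rest ih =>
    intro b
    cases b <;> simp only [pvRecA, pvGoB, pvSkipTable] <;> split_ifs <;>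
      simp_all [pvGoB, pvPipe_not_blank]

-- ===== VERDICT (by name: the statement is the Claim_ definition above) =====
theorem strip_tables_and_images_spec : Claim_equal_strip_tables_and_images := by
  intro text _
  unfold Spec_strip_tables_and_images strip_tables_and_images strip_tables_and_images_alt
  rw [pvFoldA_eq, pvRecA_eq]
  simp
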